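-- pv_equiv track=rewrite | github.com/martynasmat/cs-stats-page | backend/routes/api/faceit/helpers.py | get_faceit_level
-- ===== SOURCE A (Python) =====
-- FACEIT_LEVELS = {
--     100: "1",
--     501: "2",
--     751: "3",
--     901: "4",
--     1051: "5",
--     1201: "6",
--     1351: "7",
--     1531: "8",
--     1751: "9",
--     2001: "10",
-- }
--
-- def get_faceit_level(elo: int) -> str:
--     peak_lvl = ""
--     if elo != 0:
--         for key in FACEIT_LEVELS:
--             if elo >= key:
--                 peak_lvl = FACEIT_LEVELS[key]
--             else:
--                 break
--     return peak_lvl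
-- ===== SOURCE B (Python) =====
-- import bisect
--
-- THRESHOLDS = [100, 501, 751, 901, 1051, 1201, 1351, 1531, 1751, 2001]
-- LABELS = ["1", "2", "3", "4", "5", "6", "7", "8", "9", "10"]
--
-- def get_faceit_level(elo: int) -> str:
--     i = bisect.bisect_right(THRESHOLDS, elo)
--     return LABELS[i - 1] if i > 0 else ""
-- ===== Notes on version B (the rewrite author's own statement) =====
-- stated objective: idiomatic
-- what changed: Replaces the linear scan with early break over a dict by a binary search (bisect_right) on a sorted threshold list paired with a label list.
import Mathlib
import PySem

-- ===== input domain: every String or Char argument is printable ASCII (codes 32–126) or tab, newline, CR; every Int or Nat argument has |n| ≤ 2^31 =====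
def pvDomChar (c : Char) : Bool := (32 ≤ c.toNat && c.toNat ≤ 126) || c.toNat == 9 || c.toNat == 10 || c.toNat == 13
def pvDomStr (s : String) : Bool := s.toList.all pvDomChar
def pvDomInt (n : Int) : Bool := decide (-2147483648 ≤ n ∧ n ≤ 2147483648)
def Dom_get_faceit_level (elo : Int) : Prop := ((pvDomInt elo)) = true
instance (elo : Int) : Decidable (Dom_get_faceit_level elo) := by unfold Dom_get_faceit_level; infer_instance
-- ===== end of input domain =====

-- B replaces A's linear scan over the dict by a bisect_right binary search on a sorted threshold list (idiomatic).

-- ===== PORT A =====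
-- the FACEIT_LEVELS dict, in insertion order
def faceitLevels : List (Int × String) :=
  [(100, "1"), (501, "2"), (751, "3"), (901, "4"), (1051, "5"),
   (1201, "6"), (1351, "7"), (1531, "8"), (1751, "9"), (2001, "10")]

-- the for-loop with break: walk the keys, updating peak_lvl, stop at first key > elo
def faceitLoop : List (Int × String) → Int → String → String
  | [], _, acc => acc
  | (k, v) :: rest, elo, acc => if elo ≥ k then faceitLoop rest elo v else acc

def get_faceit_level (elo : Int) : String :=
  if elo ≠ 0 then faceitLoop faceitLevels elo "" else ""

-- ===== PORT B =====
def thresholds : List Int := [100, 501, 751, 901, 1051, 1201, 1351, 1531, 1751, 2001]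
def labels : List String := ["1", "2", "3", "4", "5", "6", "7", "8", "9", "10"]

-- bisect.bisect_right: binary search for the insertion point after equal elements
def bisectRight (xs : List Int) (x : Int) (lo hi : Nat) : Nat :=
  if lo < hi then
    let mid := (lo + hi) / 2
    if x < xs.getD mid 0 then bisectRight xs x lo mid
    else bisectRight xs x (mid + 1) hi
  else lo
termination_by hi - lo
decreasing_by all_goals omega

def get_faceit_level_alt (elo : Int) : String :=
  let i := bisectRight thresholds elo 0 thresholds.length
  if i > 0 then labels.getD (i - 1) "" else ""

-- ===== PRECONDITION & SPEC =====
def Spec_get_faceit_level (elo : Int) (out : String) : Prop := out = get_faceit_level_alt elo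
instance (elo : Int) (out : String) : Decidable (Spec_get_faceit_level elo out) := by unfold Spec_get_faceit_level; infer_instance

-- ===== CLAIM (what is proved, stated in full; the proofs are below) =====
def Claim_equal_get_faceit_level : Prop := ∀ (elo : Int), Dom_get_faceit_level elo → Spec_get_faceit_level elo (get_faceit_level elo)

-- ===== LEMMAS AND PROOFS =====
theorem bchar0 (x : Int) (hU : x < 100) : bisectRight thresholds x 0 10 = 0 := by
  rw [bisectRight]; norm_num [thresholds, (show x < (1201:Int) by omega)]
  rw [bisectRight]; norm_num [thresholds, (show x < (751:Int) by omega)]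
  rw [bisectRight]; norm_num [thresholds, (show x < (501:Int) by omega)]
  rw [bisectRight]; norm_num [thresholds, (show x < (100:Int) by omega)]
  rw [bisectRight]; norm_num

theorem bchar1 (x : Int) (hL : 100 ≤ x) (hU : x < 501) : bisectRight thresholds x 0 10 = 1 := by
  rw [bisectRight]; norm_num [thresholds, (show x < (1201:Int) by omega)]
  rw [bisectRight]; norm_num [thresholds, (show x < (751:Int) by omega)]
  rw [bisectRight]; norm_num [thresholds, (show x < (501:Int) by omega)]
  rw [bisectRight]; norm_num [thresholds, (show ¬ x < (100:Int) by omega)]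
  rw [bisectRight]; norm_num

theorem bchar2 (x : Int) (hL : 501 ≤ x) (hU : x < 751) : bisectRight thresholds x 0 10 = 2 := by
  rw [bisectRight]; norm_num [thresholds, (show x < (1201:Int) by omega)]
  rw [bisectRight]; norm_num [thresholds, (show x < (751:Int) by omega)]
  rw [bisectRight]; norm_num [thresholds, (show ¬ x < (501:Int) by omega)]
  rw [bisectRight]; norm_num

theorem bchar3 (x : Int) (hL : 751 ≤ x) (hU : x < 901) : bisectRight thresholds x 0 10 = 3 := by
  rw [bisectRight]; norm_num [thresholds, (show x < (1201:Int) by omega)]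
  rw [bisectRight]; norm_num [thresholds, (show ¬ x < (751:Int) by omega)]
  rw [bisectRight]; norm_num [thresholds, (show x < (1051:Int) by omega)]
  rw [bisectRight]; norm_num [thresholds, (show x < (901:Int) by omega)]
  rw [bisectRight]; norm_num

theorem bchar4 (x : Int) (hL : 901 ≤ x) (hU : x < 1051) : bisectRight thresholds x 0 10 = 4 := by
  rw [bisectRight]; norm_num [thresholds, (show x < (1201:Int) by omega)]
  rw [bisectRight]; norm_num [thresholds, (show ¬ x < (751:Int) by omega)]
  rw [bisectRight]; norm_num [thresholds, (show x < (1051:Int) by omega)]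
  rw [bisectRight]; norm_num [thresholds, (show ¬ x < (901:Int) by omega)]
  rw [bisectRight]; norm_num

theorem bchar5 (x : Int) (hL : 1051 ≤ x) (hU : x < 1201) : bisectRight thresholds x 0 10 = 5 := by
  rw [bisectRight]; norm_num [thresholds, (show x < (1201:Int) by omega)]
  rw [bisectRight]; norm_num [thresholds, (show ¬ x < (751:Int) by omega)]
  rw [bisectRight]; norm_num [thresholds, (show ¬ x < (1051:Int) by omega)]
  rw [bisectRight]; norm_num

theorem bchar6 (x : Int) (hL : 1201 ≤ x) (hU : x < 1351) : bisectRight thresholds x 0 10 = 6 := by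
  rw [bisectRight]; norm_num [thresholds, (show ¬ x < (1201:Int) by omega)]
  rw [bisectRight]; norm_num [thresholds, (show x < (1751:Int) by omega)]
  rw [bisectRight]; norm_num [thresholds, (show x < (1531:Int) by omega)]
  rw [bisectRight]; norm_num [thresholds, (show x < (1351:Int) by omega)]
  rw [bisectRight]; norm_num

theorem bchar7 (x : Int) (hL : 1351 ≤ x) (hU : x < 1531) : bisectRight thresholds x 0 10 = 7 := by
  rw [bisectRight]; norm_num [thresholds, (show ¬ x < (1201:Int) by omega)]
  rw [bisectRight]; norm_num [thresholds, (show x < (1751:Int) by omega)]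
  rw [bisectRight]; norm_num [thresholds, (show x < (1531:Int) by omega)]
  rw [bisectRight]; norm_num [thresholds, (show ¬ x < (1351:Int) by omega)]
  rw [bisectRight]; norm_num

theorem bchar8 (x : Int) (hL : 1531 ≤ x) (hU : x < 1751) : bisectRight thresholds x 0 10 = 8 := by
  rw [bisectRight]; norm_num [thresholds, (show ¬ x < (1201:Int) by omega)]
  rw [bisectRight]; norm_num [thresholds, (show x < (1751:Int) by omega)]
  rw [bisectRight]; norm_num [thresholds, (show ¬ x < (1531:Int) by omega)]
  rw [bisectRight]; norm_num

theorem bchar9 (x : Int) (hL : 1751 ≤ x) (hU : x < 2001) : bisectRight thresholds x 0 10 = 9 := by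
  rw [bisectRight]; norm_num [thresholds, (show ¬ x < (1201:Int) by omega)]
  rw [bisectRight]; norm_num [thresholds, (show ¬ x < (1751:Int) by omega)]
  rw [bisectRight]; norm_num [thresholds, (show x < (2001:Int) by omega)]
  rw [bisectRight]; norm_num

theorem bchar10 (x : Int) (hL : 2001 ≤ x) : bisectRight thresholds x 0 10 = 10 := by
  rw [bisectRight]; norm_num [thresholds, (show ¬ x < (1201:Int) by omega)]
  rw [bisectRight]; norm_num [thresholds, (show ¬ x < (1751:Int) by omega)]
  rw [bisectRight]; norm_num [thresholds, (show ¬ x < (2001:Int) by omega)]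
  rw [bisectRight]; norm_num

theorem ports_agree (elo : Int) : get_faceit_level elo = get_faceit_level_alt elo := by
  unfold get_faceit_level get_faceit_level_alt
  rcases (show elo < 100 ∨ (100 ≤ elo ∧ elo < 501) ∨ (501 ≤ elo ∧ elo < 751) ∨ (751 ≤ elo ∧ elo < 901) ∨ (901 ≤ elo ∧ elo < 1051) ∨ (1051 ≤ elo ∧ elo < 1201) ∨ (1201 ≤ elo ∧ elo < 1351) ∨ (1351 ≤ elo ∧ elo < 1531) ∨ (1531 ≤ elo ∧ elo < 1751) ∨ (1751 ≤ elo ∧ elo < 2001) ∨ 2001 ≤ elo by omega) with h0|h1|h2|h3|h4|h5|h6|h7|h8|h9|h10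
  · by_cases hz : elo = 0
    · rw [show thresholds.length = 10 from rfl, bchar0 elo (by omega)]
      simp [hz]
    · rw [show thresholds.length = 10 from rfl, bchar0 elo (by omega)]
      norm_num [faceitLoop, faceitLevels, hz, (show ¬ (100:Int) ≤ elo by omega)]
  ·
    rw [show thresholds.length = 10 from rfl, bchar1 elo (by omega) (by omega)]
    norm_num [faceitLoop, faceitLevels, labels, (show elo ≠ 0 by omega), (show (100:Int) ≤ elo by omega), (show ¬ (501:Int) ≤ elo by omega)]
  ·
    rw [show thresholds.length = 10 from rfl, bchar2 elo (by omega) (by omega)]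
    norm_num [faceitLoop, faceitLevels, labels, (show elo ≠ 0 by omega), (show (100:Int) ≤ elo by omega), (show (501:Int) ≤ elo by omega), (show ¬ (751:Int) ≤ elo by omega)]
  ·
    rw [show thresholds.length = 10 from rfl, bchar3 elo (by omega) (by omega)]
    norm_num [faceitLoop, faceitLevels, labels, (show elo ≠ 0 by omega), (show (100:Int) ≤ elo by omega), (show (501:Int) ≤ elo by omega), (show (751:Int) ≤ elo by omega), (show ¬ (901:Int) ≤ elo by omega)]
  ·
    rw [show thresholds.length = 10 from rfl, bchar4 elo (by omega) (by omega)]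
    norm_num [faceitLoop, faceitLevels, labels, (show elo ≠ 0 by omega), (show (100:Int) ≤ elo by omega), (show (501:Int) ≤ elo by omega), (show (751:Int) ≤ elo by omega), (show (901:Int) ≤ elo by omega), (show ¬ (1051:Int) ≤ elo by omega)]
  ·
    rw [show thresholds.length = 10 from rfl, bchar5 elo (by omega) (by omega)]
    norm_num [faceitLoop, faceitLevels, labels, (show elo ≠ 0 by omega), (show (100:Int) ≤ elo by omega), (show (501:Int) ≤ elo by omega), (show (751:Int) ≤ elo by omega), (show (901:Int) ≤ elo by omega), (show (1051:Int) ≤ elo by omega), (show ¬ (1201:Int) ≤ elo by omega)]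
  ·
    rw [show thresholds.length = 10 from rfl, bchar6 elo (by omega) (by omega)]
    norm_num [faceitLoop, faceitLevels, labels, (show elo ≠ 0 by omega), (show (100:Int) ≤ elo by omega), (show (501:Int) ≤ elo by omega), (show (751:Int) ≤ elo by omega), (show (901:Int) ≤ elo by omega), (show (1051:Int) ≤ elo by omega), (show (1201:Int) ≤ elo by omega), (show ¬ (1351:Int) ≤ elo by omega)]
  ·
    rw [show thresholds.length = 10 from rfl, bchar7 elo (by omega) (by omega)]
    norm_num [faceitLoop, faceitLevels, labels, (show elo ≠ 0 by omega), (show (100:Int) ≤ elo by omega), (show (501:Int) ≤ elo by omega), (show (751:Int) ≤ elo by omega), (show (901:Int) ≤ elo by omega), (show (1051:Int) ≤ elo by omega), (show (1201:Int) ≤ elo by omega), (show (1351:Int) ≤ elo by omega), (show ¬ (1531:Int) ≤ elo by omega)]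
  ·
    rw [show thresholds.length = 10 from rfl, bchar8 elo (by omega) (by omega)]
    norm_num [faceitLoop, faceitLevels, labels, (show elo ≠ 0 by omega), (show (100:Int) ≤ elo by omega), (show (501:Int) ≤ elo by omega), (show (751:Int) ≤ elo by omega), (show (901:Int) ≤ elo by omega), (show (1051:Int) ≤ elo by omega), (show (1201:Int) ≤ elo by omega), (show (1351:Int) ≤ elo by omega), (show (1531:Int) ≤ elo by omega), (show ¬ (1751:Int) ≤ elo by omega)]
  ·
    rw [show thresholds.length = 10 from rfl, bchar9 elo (by omega) (by omega)]
    norm_num [faceitLoop, faceitLevels, labels, (show elo ≠ 0 by omega), (show (100:Int) ≤ elo by omega), (show (501:Int) ≤ elo by omega), (show (751:Int) ≤ elo by omega), (show (901:Int) ≤ elo by omega), (show (1051:Int) ≤ elo by omega), (show (1201:Int) ≤ elo by omega), (show (1351:Int) ≤ elo by omega), (show (1531:Int) ≤ elo by omega), (show (1751:Int) ≤ elo by omega), (show ¬ (2001:Int) ≤ elo by omega)]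
  ·
    rw [show thresholds.length = 10 from rfl, bchar10 elo (by omega)]
    norm_num [faceitLoop, faceitLevels, labels, (show elo ≠ 0 by omega), (show (100:Int) ≤ elo by omega), (show (501:Int) ≤ elo by omega), (show (751:Int) ≤ elo by omega), (show (901:Int) ≤ elo by omega), (show (1051:Int) ≤ elo by omega), (show (1201:Int) ≤ elo by omega), (show (1351:Int) ≤ elo by omega), (show (1531:Int) ≤ elo by omega), (show (1751:Int) ≤ elo by omega), (show (2001:Int) ≤ elo by omega)]

-- ===== VERDICT (by name: the statement is the Claim_ definition above) =====
theorem get_faceit_level_spec : Claim_equal_get_faceit_level := by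
  intro elo _
  exact ports_agree elo
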